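-- pv_equiv track=rewrite | github.com/Maediem/Plex-NFO-Updater | plex-nfo-updater.py | get_media_type_from_nfo
-- ===== SOURCE A (Python) =====
-- def get_media_type_from_nfo(nfo_data: dict) -> str:
--     # ==================================================================================
--     # Return media type ('movie', 'show', 'season', 'episode') based on the NFO root tag
--     # ==================================================================================
--
--     tag_map = {
--         "movie": ["movie", "moviedetail", "moviedetails"],
--         "show": ["show", "showdetail", "showdetails", "tvshow", "serie", "tvserie"],
--         "season": ["season", "seasondetail", "seasondetails"],
--         "episode": ["episode", "episodedetail", "episodedetails"],
--     }
--
--     root_tag = nfo_data.get("root_tag", "").lower()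
--
--     for media_type, aliases in tag_map.items():
--         if root_tag in aliases:
--             return media_type
--
--     return ""
-- ===== SOURCE B (Python) =====
-- def get_media_type_from_nfo(nfo_data: dict) -> str:
--     # Parse the tag structurally instead of scanning alias lists: the aliases are
--     # exactly the four base types optionally suffixed with 'detail'/'details',
--     # plus the three irregular show synonyms.
--     tag = nfo_data.get("root_tag", "").lower()
--     if tag in ("tvshow", "serie", "tvserie"):
--         return "show"
--     base = tag
--     if base.endswith("details"):
--         base = base[:-7]
--     elif base.endswith("detail"):
--         base = base[:-6]
--     return base if base in ("movie", "show", "season", "episode") else ""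
-- ===== Notes on version B (the rewrite author's own statement) =====
-- stated objective: alternative
-- what changed: Replaces A's table of 15 aliases scanned bucket-by-bucket with a structural parser: strip an optional 'details'/'detail' suffix from the tag and validate the remaining base against the four media types, with the three irregular show synonyms handled up front; no alias table exists in B.
import Mathlib
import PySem

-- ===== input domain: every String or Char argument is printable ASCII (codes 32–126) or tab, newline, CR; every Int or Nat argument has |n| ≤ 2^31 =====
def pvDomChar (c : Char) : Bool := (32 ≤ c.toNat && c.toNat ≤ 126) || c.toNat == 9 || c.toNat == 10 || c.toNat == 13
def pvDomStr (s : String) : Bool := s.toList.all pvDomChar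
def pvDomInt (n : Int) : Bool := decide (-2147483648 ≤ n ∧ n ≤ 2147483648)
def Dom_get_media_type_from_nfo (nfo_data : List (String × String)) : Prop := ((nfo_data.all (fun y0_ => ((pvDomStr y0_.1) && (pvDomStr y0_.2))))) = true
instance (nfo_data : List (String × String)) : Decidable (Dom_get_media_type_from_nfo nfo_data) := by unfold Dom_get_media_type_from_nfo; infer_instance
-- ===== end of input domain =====

-- B replaces A's alias-table scan by a structural parser: strip an optional
-- 'details'/'detail' suffix and validate the remaining base (objective: alternative).

-- ===== PORT A =====
-- the for-loop over tag_map.items(): first bucket whose alias list contains root_tag wins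
def pvLoopA (root_tag : String) : List (String × List String) → String
  | [] => ""
  | (media_type, aliases) :: rest =>
      if root_tag ∈ aliases then media_type else pvLoopA root_tag rest

def get_media_type_from_nfo (nfo_data : List (String × String)) : String :=
  let tag_map : PySem.Dict String (List String) := PySem.Dict.ofList
    [("movie", ["movie", "moviedetail", "moviedetails"]),
     ("show", ["show", "showdetail", "showdetails", "tvshow", "serie", "tvserie"]),
     ("season", ["season", "seasondetail", "seasondetails"]),
     ("episode", ["episode", "episodedetail", "episodedetails"])]
  let root_tag := PySem.Str.lower ((PySem.Dict.mk nfo_data).getD "root_tag" "")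
  pvLoopA root_tag tag_map.items

-- ===== PORT B =====
-- Source B's parser on a tag: irregular show synonyms, then suffix stripping, then base check
def pvParseB (tag : String) : String :=
  if tag = "tvshow" ∨ tag = "serie" ∨ tag = "tvserie" then "show"
  else
    let base :=
      if PySem.Str.endswith tag "details" then PySem.Str.slice tag none (some (-7))
      else if PySem.Str.endswith tag "detail" then PySem.Str.slice tag none (some (-6))
      else tag
    if base = "movie" ∨ base = "show" ∨ base = "season" ∨ base = "episode" then base else ""

def get_media_type_from_nfo_alt (nfo_data : List (String × String)) : String :=
  pvParseB (PySem.Str.lower ((PySem.Dict.mk nfo_data).getD "root_tag" ""))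

-- ===== PRECONDITION & SPEC =====
def Spec_get_media_type_from_nfo (nfo_data : List (String × String)) (out : String) : Prop := out = get_media_type_from_nfo_alt nfo_data
instance (nfo_data : List (String × String)) (out : String) : Decidable (Spec_get_media_type_from_nfo nfo_data out) := by unfold Spec_get_media_type_from_nfo; infer_instance

-- ===== CLAIM (what is proved, stated in full; the proofs are below) =====
def Claim_equal_get_media_type_from_nfo : Prop := ∀ (nfo_data : List (String × String)), Dom_get_media_type_from_nfo nfo_data → Spec_get_media_type_from_nfo nfo_data (get_media_type_from_nfo nfo_data)

-- ===== LEMMAS AND PROOFS =====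

-- stripping a suffix that is really there reconstitutes the string
theorem pv_strip_suffix {s base suf : String} (n : Nat)
    (h : suf.toList <:+ s.toList) (hn : suf.toList.length = n) (hn0 : 0 < n)
    (hb : PySem.Str.slice s none (some (-(n : Int))) = base) :
    s = base ++ suf := by
  obtain ⟨pre, hpre⟩ := h
  have hsl : (PySem.Str.slice s none (some (-(n : Int)))).toList
      = s.toList.take (s.toList.length - n) := by
    simp only [PySem.Str.toList_slice, PySem.Chars.slice_eq_listSlice]
    exact PySem.List.slice_to_neg_natCast _ _ hn0
  have hpre' : s.toList.take (s.toList.length - n) = pre := by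
    rw [← hpre, ← hn]; simp
  have hbase : base.toList = pre := by rw [← hb, hsl, hpre']
  have : s.toList = (base ++ suf).toList := by
    rw [String.toList_append, hbase, hpre]
  exact String.toList_inj.mp this

-- for every root tag, A's bucket scan and B's structural parse agree
theorem pv_parse_agree (s : String) :
    pvLoopA s (PySem.Dict.ofList
      [("movie", ["movie", "moviedetail", "moviedetails"]),
       ("show", ["show", "showdetail", "showdetails", "tvshow", "serie", "tvserie"]),
       ("season", ["season", "seasondetail", "seasondetails"]),
       ("episode", ["episode", "episodedetail", "episodedetails"])]).items
    = pvParseB s := by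
  by_cases h1 : s = "movie"
  · subst h1; decide
  by_cases h2 : s = "moviedetail"
  · subst h2; decide
  by_cases h3 : s = "moviedetails"
  · subst h3; decide
  by_cases h4 : s = "show"
  · subst h4; decide
  by_cases h5 : s = "showdetail"
  · subst h5; decide
  by_cases h6 : s = "showdetails"
  · subst h6; decide
  by_cases h7 : s = "tvshow"
  · subst h7; decide
  by_cases h8 : s = "serie"
  · subst h8; decide
  by_cases h9 : s = "tvserie"
  · subst h9; decide
  by_cases h10 : s = "season"
  · subst h10; decide
  by_cases h11 : s = "seasondetail"
  · subst h11; decide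
  by_cases h12 : s = "seasondetails"
  · subst h12; decide
  by_cases h13 : s = "episode"
  · subst h13; decide
  by_cases h14 : s = "episodedetail"
  · subst h14; decide
  by_cases h15 : s = "episodedetails"
  · subst h15; decide
  -- general case: s is none of the 15 aliases; both sides return ""
  have hA : pvLoopA s (PySem.Dict.ofList
      [("movie", ["movie", "moviedetail", "moviedetails"]),
       ("show", ["show", "showdetail", "showdetails", "tvshow", "serie", "tvserie"]),
       ("season", ["season", "seasondetail", "seasondetails"]),
       ("episode", ["episode", "episodedetail", "episodedetails"])]).items = "" := by
    have hItems : (PySem.Dict.ofList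
        [("movie", ["movie", "moviedetail", "moviedetails"]),
         ("show", ["show", "showdetail", "showdetails", "tvshow", "serie", "tvserie"]),
         ("season", ["season", "seasondetail", "seasondetails"]),
         ("episode", ["episode", "episodedetail", "episodedetails"])] :
        PySem.Dict String (List String)).items
        = [("movie", ["movie", "moviedetail", "moviedetails"]),
           ("show", ["show", "showdetail", "showdetails", "tvshow", "serie", "tvserie"]),
           ("season", ["season", "seasondetail", "seasondetails"]),
           ("episode", ["episode", "episodedetail", "episodedetails"])] := by decide
    rw [hItems]
    simp [pvLoopA, h1, h2, h3, h4, h5, h6, h7, h8, h9, h10, h11, h12, h13, h14, h15]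
  rw [hA]
  unfold pvParseB
  rw [if_neg (by tauto)]
  by_cases hds : PySem.Str.endswith s "details" = true
  · have hsuf : ("details" : String).toList <:+ s.toList :=
      (PySem.Chars.endswith_iff s.toList ("details" : String).toList).mp (by simpa using hds)
    rw [if_pos hds, if_neg]
    rintro (hb | hb | hb | hb)
    · exact h3 (by rw [pv_strip_suffix 7 hsuf (by decide) (by decide) hb]; decide)
    · exact h6 (by rw [pv_strip_suffix 7 hsuf (by decide) (by decide) hb]; decide)
    · exact h12 (by rw [pv_strip_suffix 7 hsuf (by decide) (by decide) hb]; decide)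
    · exact h15 (by rw [pv_strip_suffix 7 hsuf (by decide) (by decide) hb]; decide)
  · by_cases hd : PySem.Str.endswith s "detail" = true
    · have hsuf : ("detail" : String).toList <:+ s.toList :=
        (PySem.Chars.endswith_iff s.toList ("detail" : String).toList).mp (by simpa using hd)
      rw [if_neg hds, if_pos hd, if_neg]
      rintro (hb | hb | hb | hb)
      · exact h2 (by rw [pv_strip_suffix 6 hsuf (by decide) (by decide) hb]; decide)
      · exact h5 (by rw [pv_strip_suffix 6 hsuf (by decide) (by decide) hb]; decide)
      · exact h11 (by rw [pv_strip_suffix 6 hsuf (by decide) (by decide) hb]; decide)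
      · exact h14 (by rw [pv_strip_suffix 6 hsuf (by decide) (by decide) hb]; decide)
    · rw [if_neg hds, if_neg hd, if_neg]
      rintro (hb | hb | hb | hb)
      · exact h1 hb
      · exact h4 hb
      · exact h10 hb
      · exact h13 hb

-- ===== VERDICT (by name: the statement is the Claim_ definition above) =====
theorem get_media_type_from_nfo_spec : Claim_equal_get_media_type_from_nfo := by
  intro nfo_data _
  show get_media_type_from_nfo nfo_data = get_media_type_from_nfo_alt nfo_data
  simp only [get_media_type_from_nfo, get_media_type_from_nfo_alt]
  exact pv_parse_agree _
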